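-- pv_equiv track=rewrite | github.com/Naman6019/MarketMind | backend/app/jobs/sync_fundamentals.py | _merge_statement_rows
-- ===== SOURCE A (Python) =====
-- def _merge_statement_rows(rows: list[dict]) -> list[dict]:
--     merged: dict[tuple, dict] = {}
--     for row in rows:
--         key = (
--             row.get("symbol"),
--             row.get("period_type"),
--             row.get("period_end_date"),
--             row.get("source"),
--         )
--         existing = merged.setdefault(key, dict(row))
--         for field, value in row.items():
--             if existing.get(field) is None and value is not None:
--                 existing[field] = value
--     return list(merged.values())
-- ===== SOURCE B (Python) =====
-- _KEY_FIELDS = ("symbol", "period_type", "period_end_date", "source")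
--
--
-- def _first_non_none(group, field):
--     for row in group:
--         value = row.get(field)
--         if value is not None:
--             return value
--     return None
--
--
-- def _merge_statement_rows(rows: list[dict]) -> list[dict]:
--     # Pass 1: group rows by key tuple, preserving first-seen key order.
--     groups: dict[tuple, list[dict]] = {}
--     for row in rows:
--         key = tuple(row.get(f) for f in _KEY_FIELDS)
--         groups.setdefault(key, []).append(row)
--     # Pass 2: reduce each group independently. The merged dict's fields are the
--     # first row's fields (in order) followed by every other field, in order of
--     # its first non-None occurrence; each field gets the first non-None value
--     # found across the group (None if there is none).
--     result = []
--     for group in groups.values():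
--         fields = list(group[0])
--         seen = set(fields)
--         for row in group[1:]:
--             for field, value in row.items():
--                 if value is not None and field not in seen:
--                     fields.append(field)
--                     seen.add(field)
--         result.append({f: _first_non_none(group, f) for f in fields})
--     return result
-- ===== Notes on version B (the rewrite author's own statement) =====
-- stated objective: alternative
-- what changed: A interleaves grouping and merging by mutating one partially-merged dict per key inside a single pass; B is a two-pass group-then-reduce: it first collects the list of rows per key tuple, then builds each merged dict from scratch by enumerating the field order (first row's fields, then later fields at their first non-None occurrence) and selecting the first non-None value per field across the group.
import Mathlib
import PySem

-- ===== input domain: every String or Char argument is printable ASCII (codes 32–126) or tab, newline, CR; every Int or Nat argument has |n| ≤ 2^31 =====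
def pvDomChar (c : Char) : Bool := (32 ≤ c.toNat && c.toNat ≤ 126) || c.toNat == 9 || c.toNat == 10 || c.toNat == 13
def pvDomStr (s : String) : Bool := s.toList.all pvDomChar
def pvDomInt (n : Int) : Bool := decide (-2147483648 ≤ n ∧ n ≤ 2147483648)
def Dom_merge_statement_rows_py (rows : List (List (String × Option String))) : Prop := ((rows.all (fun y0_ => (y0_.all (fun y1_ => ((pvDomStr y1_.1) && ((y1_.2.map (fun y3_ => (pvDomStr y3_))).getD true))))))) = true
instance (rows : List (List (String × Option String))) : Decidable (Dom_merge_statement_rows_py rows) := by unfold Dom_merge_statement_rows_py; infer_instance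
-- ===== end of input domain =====

-- B replaces A's single-pass mutate-in-place merge by a two-pass group-then-reduce of the same cost
-- (objective: alternative); A and B are proved to return the same value on every input.
-- Rows arrive as association lists; each Python row is a dict, viewed via PySem.Dict.ofList.

-- ===== PORT A =====

-- key = (row.get("symbol"), row.get("period_type"), row.get("period_end_date"), row.get("source"))
def pvRowKey (r : PySem.Dict String (Option String)) :
    Option String × Option String × Option String × Option String :=
  ((r.get? "symbol").getD none, (r.get? "period_type").getD none,
   (r.get? "period_end_date").getD none, (r.get? "source").getD none)

-- A's inner loop: for field, value in row.items(): if existing.get(field) is None and value is not None: existing[field] = value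
def pvMergeRowA (existing r : PySem.Dict String (Option String)) : PySem.Dict String (Option String) :=
  r.items.foldl
    (fun ex fv => if ((ex.get? fv.1).getD none).isNone && fv.2.isSome then ex.insert fv.1 fv.2 else ex)
    existing

-- A's outer loop body: existing = merged.setdefault(key, dict(row)), then the in-place inner merge
def pvStepA
    (merged : PySem.Dict (Option String × Option String × Option String × Option String)
      (PySem.Dict String (Option String)))
    (row : List (String × Option String)) :
    PySem.Dict (Option String × Option String × Option String × Option String)
      (PySem.Dict String (Option String)) :=
  let r := PySem.Dict.ofList row
  let key := pvRowKey r
  let existing := (merged.get? key).getD r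
  merged.insert key (pvMergeRowA existing r)

def merge_statement_rows_py (rows : List (List (String × Option String))) :
    List (List (String × Option String)) :=
  (rows.foldl pvStepA PySem.Dict.empty).values.map PySem.Dict.items

-- ===== PORT B =====
-- B helpers (from Source B): _first_non_none and the field-order enumeration

def pvFirstNonNone (group : List (PySem.Dict String (Option String))) (field : String) :
    Option String :=
  match group with
  | [] => none
  | r :: rest =>
    match (r.get? field).getD none with
    | some v => some v
    | none => pvFirstNonNone rest field

-- fields = list(group[0]); seen = set(fields); conditional append — tracked as one PySem.Set
def pvGroupFields (group : List (PySem.Dict String (Option String))) : List String :=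
  match group with
  | [] => []
  | g0 :: rest =>
    rest.foldl
      (fun fields r =>
        r.items.foldl (fun fields fv => if fv.2.isSome then PySem.Set.add fields fv.1 else fields)
          fields)
      (PySem.Set.ofList (PySem.Dict.keys g0))

-- B's pass-1 loop body: groups.setdefault(key, []).append(row)
def pvStepB
    (groups : PySem.Dict (Option String × Option String × Option String × Option String)
      (List (PySem.Dict String (Option String))))
    (row : List (String × Option String)) :
    PySem.Dict (Option String × Option String × Option String × Option String)
      (List (PySem.Dict String (Option String))) :=
  let r := PySem.Dict.ofList row
  groups.modify (pvRowKey r) [] (· ++ [r])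

def merge_statement_rows_py_alt (rows : List (List (String × Option String))) :
    List (List (String × Option String)) :=
  let groups := rows.foldl pvStepB PySem.Dict.empty
  -- {f: _first_non_none(group, f) for f in fields}: fields are distinct, so the dict's items
  -- list is exactly this map
  groups.values.map (fun group => (pvGroupFields group).map (fun f => (f, pvFirstNonNone group f)))

-- ===== PRECONDITION & SPEC =====
def Spec_merge_statement_rows_py (rows : List (List (String × Option String))) (out : List (List (String × Option String))) : Prop := out = merge_statement_rows_py_alt rows
instance (rows : List (List (String × Option String))) (out : List (List (String × Option String))) : Decidable (Spec_merge_statement_rows_py rows out) := by unfold Spec_merge_statement_rows_py; infer_instance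

-- ===== CLAIM (what is proved, stated in full; the proofs are below) =====
def Claim_equal_merge_statement_rows_py : Prop := ∀ (rows : List (List (String × Option String))), Dom_merge_statement_rows_py rows → Spec_merge_statement_rows_py rows (merge_statement_rows_py rows)


-- ===== LEMMAS AND PROOFS =====

-- abbreviations used only by the proofs
-- first binding's value for a field in a raw items list (what A's 'existing.get(field) is None' test sees)
def pvLookup (l : List (String × Option String)) (f : String) : Option String :=
  match l.find? (fun q => q.1 == f) with
  | some q => q.2
  | none => none

def pvFill (l : List (String × Option String)) (p : String × Option String) :
    String × Option String :=
  (p.1, match p.2 with | some v => some v | none => pvLookup l p.1)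

-- the value A's merged dict holds for a group (the first row seeded by setdefault, then folded)
def pvAval (gl : List (PySem.Dict String (Option String))) : PySem.Dict String (Option String) :=
  match gl with
  | [] => PySem.Dict.empty
  | h :: t => t.foldl pvMergeRowA h

-- pvLookup on a dict's own items list is the dict lookup A's 'existing.get' performs
theorem pvLookup_eq' (r : PySem.Dict String (Option String)) (f : String) :
    pvLookup r.items f = (r.get? f).getD none := by
  unfold pvLookup PySem.Dict.get?
  cases r.items.find? (fun q => q.1 == f) <;> rfl

theorem pvAddIfFold_nodup (l : List (String × Option String)) (F : List String) (h : F.Nodup) :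
    (l.foldl (fun fields fv => if fv.2.isSome then PySem.Set.add fields fv.1 else fields)
      F).Nodup := by
  induction l generalizing F with
  | nil => exact h
  | cons q l ih =>
    simp only [List.foldl_cons]
    split
    · exact ih _ (PySem.Set.nodup_add F q.1 h)
    · exact ih _ h

theorem pvRowsFold_nodup (rest : List (PySem.Dict String (Option String))) (F : List String)
    (h : F.Nodup) :
    (rest.foldl
      (fun fields r =>
        r.items.foldl (fun fields fv => if fv.2.isSome then PySem.Set.add fields fv.1 else fields)
          fields)
      F).Nodup := by
  induction rest generalizing F with
  | nil => exact h
  | cons r rest ih => exact ih _ (pvAddIfFold_nodup r.items F h)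

theorem pvAddIfFold_mem_mono (l : List (String × Option String)) (F : List String) (f : String)
    (h : f ∈ F) :
    f ∈ l.foldl (fun fields fv => if fv.2.isSome then PySem.Set.add fields fv.1 else fields) F := by
  induction l generalizing F with
  | nil => exact h
  | cons q l ih =>
    simp only [List.foldl_cons]
    split
    · exact ih _ ((PySem.Set.mem_add F q.1 f).mpr (Or.inl h))
    · exact ih _ h

theorem pvAddIfFold_mem_of_item (l : List (String × Option String)) (F : List String)
    (q : String × Option String) (hq : q ∈ l) (hs : q.2.isSome = true) :
    q.1 ∈ l.foldl (fun fields fv => if fv.2.isSome then PySem.Set.add fields fv.1 else fields)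
      F := by
  induction l generalizing F with
  | nil => cases hq
  | cons a l ih =>
    simp only [List.foldl_cons]
    rcases List.mem_cons.mp hq with he | hm
    · subst he
      rw [if_pos hs]
      exact pvAddIfFold_mem_mono l _ q.1 ((PySem.Set.mem_add F q.1 q.1).mpr (Or.inr rfl))
    · exact ih _ hm

theorem pvRowsFold_mem_mono (rest : List (PySem.Dict String (Option String))) (F : List String)
    (f : String) (h : f ∈ F) :
    f ∈ rest.foldl
      (fun fields r =>
        r.items.foldl (fun fields fv => if fv.2.isSome then PySem.Set.add fields fv.1 else fields)
          fields)
      F := by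
  induction rest generalizing F with
  | nil => exact h
  | cons r rest ih => exact ih _ (pvAddIfFold_mem_mono r.items F f h)

theorem pvRowsFold_mem_of_row (rest : List (PySem.Dict String (Option String))) (F : List String)
    (r : PySem.Dict String (Option String)) (hr : r ∈ rest) (q : String × Option String)
    (hq : q ∈ r.items) (hs : q.2.isSome = true) :
    q.1 ∈ rest.foldl
      (fun fields r =>
        r.items.foldl (fun fields fv => if fv.2.isSome then PySem.Set.add fields fv.1 else fields)
          fields)
      F := by
  induction rest generalizing F with
  | nil => cases hr
  | cons a rest ih =>
    simp only [List.foldl_cons]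
    rcases List.mem_cons.mp hr with he | hm
    · subst he
      exact pvRowsFold_mem_mono rest _ q.1 (pvAddIfFold_mem_of_item r.items F q hq hs)
    · exact ih _ hm

theorem pvFnn_cases (gl : List (PySem.Dict String (Option String))) (f : String)
    (h : pvFirstNonNone gl f ≠ none) :
    ∃ r ∈ gl, ∃ v, r.get? f = some (some v) := by
  induction gl with
  | nil => exact absurd rfl h
  | cons g0 rest ih =>
    rw [pvFirstNonNone] at h
    cases hg : (g0.get? f).getD none with
    | some v =>
      refine ⟨g0, List.mem_cons_self, v, ?_⟩
      cases hgf : g0.get? f with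
      | none => rw [hgf] at hg; cases hg
      | some w => rw [hgf] at hg; simp only [Option.getD_some] at hg; rw [hg]
    | none =>
      rw [hg] at h
      obtain ⟨r, hr, v, hv⟩ := ih h
      exact ⟨r, List.mem_cons_of_mem _ hr, v, hv⟩


theorem pvMergeFold (l : List (String × Option String)) (d : PySem.Dict String (Option String))
    (hd : d.keys.Nodup) (hl : (l.map (·.1)).Nodup) :
    (l.foldl
        (fun ex fv =>
          if ((ex.get? fv.1).getD none).isNone && fv.2.isSome then ex.insert fv.1 fv.2 else ex)
        d).items
      = d.items.map (pvFill l) ++ l.filter (fun q => q.2.isSome && !(d.contains q.1)) := by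
  induction l generalizing d with
  | nil =>
    simp only [List.foldl_nil, List.filter_nil, List.append_nil]
    rw [List.map_congr_left (g := id), List.map_id]
    rintro ⟨a, b⟩ _
    cases b <;> rfl
  | cons q l ih =>
    obtain ⟨f, v⟩ := q
    simp only [List.map_cons, List.nodup_cons] at hl
    have hfl : f ∉ l.map (·.1) := hl.1
    have lookup_cons : ∀ g : String, pvLookup ((f, v) :: l) g
        = if (f == g) then v else pvLookup l g := by
      intro g
      simp only [pvLookup, List.find?_cons]
      by_cases h : (f == g) = true <;> simp [h]
    have lookup_not_mem : pvLookup l f = none := by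
      simp only [pvLookup]
      rw [List.find?_eq_none.mpr]
      intro x hx
      simp only [beq_iff_eq]
      intro e
      exact hfl (e ▸ List.mem_map_of_mem hx)
    have mem_contains : ∀ p ∈ d.items, d.contains p.1 = true := by
      intro p hp
      simp only [PySem.Dict.contains, List.any_eq_true]
      exact ⟨p, hp, by simp⟩
    simp only [List.foldl_cons, List.filter_cons]
    by_cases hv : v.isSome
    · obtain ⟨v0, rfl⟩ := Option.isSome_iff_exists.mp hv
      by_cases hg : ((d.get? f).getD none).isNone
      · rw [if_pos (by simp [hv, hg])]
        by_cases hc : d.contains f = true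
        · -- f already a key of d, stored value none: insert overwrites in place
          have hget : d.get? f = some none := by
            cases hgf : d.get? f with
            | none =>
              exfalso
              have hco := PySem.Dict.contains_eq_isSome_get? (d := d) (k := f)
              rw [hgf] at hco; rw [hco] at hc; simp at hc
            | some w =>
              rw [hgf] at hg; simp only [Option.getD_some, Option.isNone_iff_eq_none] at hg
              rw [hg]
          rw [ih (d.insert f (some v0)) (PySem.Dict.nodup_keys_insert d f (some v0) hd) hl.2,
            PySem.Dict.items_insert_of_contains d (some v0) hc, List.map_map]
          have hmap : d.items.map (pvFill l ∘ fun p => if p.1 == f then (f, some v0) else p)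
              = d.items.map (pvFill ((f, some v0) :: l)) := by
            apply List.map_congr_left
            intro p hp
            by_cases he : p.1 = f
            · have hp2 : p.2 = none := by
                have h1 := PySem.Dict.get?_of_mem_items d (by simpa using hp) hd
                rw [he, hget] at h1
                exact (Option.some_inj.mp h1).symm
              simp only [Function.comp_apply, pvFill, hp2, he, lookup_cons,
                beq_self_eq_true, if_true]
            · have hpe : (p.1 == f) = false := by simpa using he
              have hfp : ¬ ((f == p.1) = true) := by
                simp only [beq_iff_eq]
                exact fun e => he e.symm
              simp only [Function.comp_apply, hpe, Bool.false_eq_true, if_false, pvFill]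
              cases p.2 with
              | some w => rfl
              | none => rw [lookup_cons, if_neg hfp]
          have hfil : l.filter (fun q => q.2.isSome && !((d.insert f (some v0)).contains q.1))
              = l.filter (fun q => q.2.isSome && !(d.contains q.1)) := by
            apply List.filter_congr
            intro x hx
            rw [PySem.Dict.contains_insert]
            by_cases he : x.1 = f
            · subst he
              simp [hc]
            · have hb : (x.1 == f) = false := by simpa using he
              simp [hb]
          rw [hmap, hfil, if_neg (by simp [hc])]
        · -- f is a new key: insert appends
          have hcb : d.contains f = false := by simpa using hc
          rw [ih (d.insert f (some v0)) (PySem.Dict.nodup_keys_insert d f (some v0) hd) hl.2,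
            PySem.Dict.items_insert_of_not_contains d (some v0) hcb, List.map_append]
          have hmap : d.items.map (pvFill l) = d.items.map (pvFill ((f, some v0) :: l)) := by
            apply List.map_congr_left
            intro p hp
            have he : p.1 ≠ f := by
              intro e
              rw [← e, mem_contains p hp] at hcb
              exact Bool.true_eq_false.mp hcb
            have hfp : ¬ ((f == p.1) = true) := by
              simp only [beq_iff_eq]
              exact fun e => he e.symm
            simp only [pvFill]
            cases p.2 with
            | some w => rfl
            | none => rw [lookup_cons, if_neg hfp]
          have hfil : l.filter (fun q => q.2.isSome && !((d.insert f (some v0)).contains q.1))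
              = l.filter (fun q => q.2.isSome && !(d.contains q.1)) := by
            apply List.filter_congr
            intro x hx
            rw [PySem.Dict.contains_insert]
            have hb : (x.1 == f) = false := by
              simp only [beq_eq_false_iff_ne, ne_eq]
              intro e
              exact hfl (e ▸ List.mem_map_of_mem hx)
            simp [hb]
          rw [hmap, hfil, if_pos (by simp [hv, hcb])]
          have hone : [(f, some v0)].map (pvFill l) = [(f, some v0)] := rfl
          rw [hone, List.append_assoc, List.singleton_append]
      · -- existing non-None value: no insert, and the filter drops (f, some v0)
        rw [if_neg (by simp [hg]), ih d hd hl.2]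
        have hc : d.contains f = true := by
          cases hgf : d.get? f with
          | none => rw [hgf] at hg; simp at hg
          | some w =>
            have hco := PySem.Dict.contains_eq_isSome_get? (d := d) (k := f)
            rw [hgf] at hco; rw [hco]; rfl
        have hmap : d.items.map (pvFill l) = d.items.map (pvFill ((f, some v0) :: l)) := by
          apply List.map_congr_left
          intro p hp
          simp only [pvFill]
          cases hp2 : p.2 with
          | some w => rfl
          | none =>
            have he : p.1 ≠ f := by
              intro e
              have h1 := PySem.Dict.get?_of_mem_items d (by simpa using hp) hd
              rw [e, hp2] at h1
              rw [h1] at hg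
              simp at hg
            have hfp : ¬ ((f == p.1) = true) := by
              simp only [beq_iff_eq]
              exact fun e => he e.symm
            rw [lookup_cons, if_neg hfp]
        rw [hmap, if_neg (by simp [hc])]
    · -- v = none: both the step and the filter ignore (f, v)
      have hvn : v = none := Option.not_isSome_iff_eq_none.mp hv
      subst hvn
      rw [if_neg (by simp), ih d hd hl.2, if_neg (by simp)]
      have hmap : d.items.map (pvFill l) = d.items.map (pvFill ((f, none) :: l)) := by
        apply List.map_congr_left
        intro p hp
        simp only [pvFill]
        cases p.2 with
        | some w => rfl
        | none =>
          rw [lookup_cons]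
          by_cases he : (f == p.1) = true
          · rw [if_pos he, ← (by simpa using he : f = p.1), lookup_not_mem]
          · rw [if_neg he]
      rw [hmap]

-- characterisation of one inner-merge step of A over a row with distinct field names
theorem pvMergeRowA_items (d r : PySem.Dict String (Option String))
    (hd : d.keys.Nodup) (hr : r.keys.Nodup) :
    (pvMergeRowA d r).items
      = d.items.map (pvFill r.items)
        ++ r.items.filter (fun q => q.2.isSome && !(d.contains q.1)) := by
  have hl : (r.items.map (·.1)).Nodup := by
    simpa [PySem.Dict.keys] using hr
  simpa [pvMergeRowA] using pvMergeFold r.items d hd hl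

theorem pvMergeRowA_self (d : PySem.Dict String (Option String)) (hd : d.keys.Nodup) :
    pvMergeRowA d d = d := by
  apply PySem.Dict.ext
  rw [pvMergeRowA_items d d hd hd]
  have h1 : d.items.filter (fun q => q.2.isSome && !(d.contains q.1)) = [] := by
    rw [List.filter_eq_nil_iff]
    intro q hq
    have hc : d.contains q.1 = true := by
      simp only [PySem.Dict.contains, List.any_eq_true]
      exact ⟨q, hq, by simp⟩
    simp [hc]
  rw [h1, List.append_nil]
  have h2 : ∀ p ∈ d.items, pvFill d.items p = p := by
    rintro ⟨a, b⟩ hp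
    cases b with
    | some w => rfl
    | none =>
      have hg : d.get? a = some none := PySem.Dict.get?_of_mem_items d hp hd
      simp only [pvFill, pvLookup_eq' d a, hg, Option.getD_some]
  rw [List.map_congr_left h2]
  simp

theorem pvAval_append (gl : List (PySem.Dict String (Option String)))
    (r : PySem.Dict String (Option String)) (h : gl ≠ []) :
    pvAval (gl ++ [r]) = pvMergeRowA (pvAval gl) r := by
  cases gl with
  | nil => exact absurd rfl h
  | cons h t => simp [pvAval, List.foldl_append]

theorem pvFirstNonNone_append (gl : List (PySem.Dict String (Option String)))
    (r : PySem.Dict String (Option String)) (f : String) :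
    pvFirstNonNone (gl ++ [r]) f
      = match pvFirstNonNone gl f with
        | some v => some v
        | none => (r.get? f).getD none := by
  induction gl with
  | nil =>
    simp only [List.nil_append, pvFirstNonNone]
    cases (r.get? f).getD none <;> rfl
  | cons g0 rest ih =>
    simp only [List.cons_append, pvFirstNonNone]
    cases (g0.get? f).getD none with
    | some v => rfl
    | none => exact ih

theorem pvGroupFields_append (g0 : PySem.Dict String (Option String))
    (rest : List (PySem.Dict String (Option String))) (r : PySem.Dict String (Option String)) :
    pvGroupFields ((g0 :: rest) ++ [r])
      = r.items.foldl
          (fun fields fv => if fv.2.isSome then PySem.Set.add fields fv.1 else fields)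
          (pvGroupFields (g0 :: rest)) := by
  simp [pvGroupFields, List.foldl_append]

theorem pvAddIf_fold (l : List (String × Option String)) (F : List String)
    (hl : (l.map (·.1)).Nodup) :
    l.foldl (fun fields fv => if fv.2.isSome then PySem.Set.add fields fv.1 else fields) F
      = F ++ (l.filter (fun q => q.2.isSome && !(decide (q.1 ∈ F)))).map (·.1) := by
  induction l generalizing F with
  | nil => simp
  | cons q l ih =>
    simp only [List.map_cons, List.nodup_cons] at hl
    simp only [List.foldl_cons, List.filter_cons]
    by_cases hs : q.2.isSome
    · by_cases hm : q.1 ∈ F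
      · rw [if_pos hs, PySem.Set.add_of_mem hm, ih _ hl.2]
        simp [hs, hm]
      · rw [if_pos hs, PySem.Set.add_of_not_mem hm, ih _ hl.2]
        have : l.filter (fun q' => q'.2.isSome && !(decide (q'.1 ∈ F ++ [q.1])))
            = l.filter (fun q' => q'.2.isSome && !(decide (q'.1 ∈ F))) := by
          apply List.filter_congr
          intro q' hq'
          have : q'.1 ≠ q.1 := by
            intro e; exact hl.1 (e ▸ List.mem_map_of_mem hq')
          simp [this]
        rw [this]
        simp [hs, hm]
    · rw [if_neg hs, ih _ hl.2]
      simp [hs]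

theorem pvGroupFields_nodup (gl : List (PySem.Dict String (Option String))) :
    (pvGroupFields gl).Nodup := by
  cases gl with
  | nil => simp [pvGroupFields]
  | cons g0 rest =>
    exact pvRowsFold_nodup rest (PySem.Set.ofList (PySem.Dict.keys g0))
      (PySem.Set.nodup_ofList _)

theorem pvFirstNonNone_none_of_not_mem (gl : List (PySem.Dict String (Option String)))
    (f : String) (h : f ∉ pvGroupFields gl) :
    pvFirstNonNone gl f = none := by
  by_contra h2
  obtain ⟨r, hr, v, hget⟩ := pvFnn_cases gl f h2
  cases gl with
  | nil => cases hr
  | cons g0 rest =>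
    apply h
    simp only [pvGroupFields]
    rcases List.mem_cons.mp hr with he | hm
    · subst he
      apply pvRowsFold_mem_mono
      rw [PySem.Set.mem_ofList]
      by_contra hk
      rw [(PySem.Dict.get?_eq_none_iff_not_mem_keys r f).mpr hk] at hget
      cases hget
    · exact pvRowsFold_mem_of_row rest _ r hm (f, some v)
        (PySem.Dict.mem_items_of_get?_eq_some r hget) rfl

-- the per-group reduction: A's folded dict IS B's fields-map
theorem pvGroup_spec (gl : List (PySem.Dict String (Option String))) (h : gl ≠ [])
    (hk : ∀ r ∈ gl, r.keys.Nodup) :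
    (pvAval gl).items = (pvGroupFields gl).map (fun f => (f, pvFirstNonNone gl f)) := by
  revert h hk
  induction gl using List.reverseRecOn with
  | nil => intro h _; exact absurd rfl h
  | append_singleton gl r ih =>
    intro _ hk
    have hr : r.keys.Nodup := hk r (by simp)
    cases gl with
    | nil =>
      -- singleton group: A's value is the first row itself
      simp only [List.nil_append]
      have h1 : pvGroupFields [r] = PySem.Dict.keys r := by
        simp only [pvGroupFields]
        exact PySem.Set.ofList_eq_self_of_nodup _ hr
      show r.items = _
      rw [h1, PySem.Dict.items_eq_map_keys r hr none]
      apply List.map_congr_left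
      intro f _
      have h2 : pvFirstNonNone [r] f = (r.get? f).getD none := by
        simp only [pvFirstNonNone]
        cases (r.get? f).getD none <;> rfl
      rw [h2, PySem.Dict.getD_eq_get?_getD]
    | cons g0 rest =>
      have hk' : ∀ x ∈ g0 :: rest, (PySem.Dict.keys x).Nodup :=
        fun x hx => hk x (List.mem_append_left _ hx)
      have IH := ih (by simp) hk'
      have hFn : (pvGroupFields (g0 :: rest)).Nodup := pvGroupFields_nodup _
      have hkeys : (pvAval (g0 :: rest)).keys = pvGroupFields (g0 :: rest) := by
        show (pvAval (g0 :: rest)).items.map (·.1) = _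
        rw [IH, List.map_map]
        exact (List.map_congr_left fun f _ => rfl).trans (List.map_id _)
      have hdk : (pvAval (g0 :: rest)).keys.Nodup := by rw [hkeys]; exact hFn
      have hrl : (r.items.map (·.1)).Nodup := by simpa [PySem.Dict.keys] using hr
      rw [pvAval_append _ r (by simp), pvMergeRowA_items _ r hdk hr, IH,
        pvGroupFields_append g0 rest r, pvAddIf_fold r.items _ hrl, List.map_append]
      congr 1
      · -- previously known fields: fill a stored None with this row's value
        rw [List.map_map]
        apply List.map_congr_left
        intro f _
        simp only [Function.comp_apply, pvFill, pvFirstNonNone_append]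
        cases pvFirstNonNone (g0 :: rest) f with
        | some v => rfl
        | none => rw [pvLookup_eq']
      · -- fresh fields of this row carrying a non-None value are appended
        have hpred : ∀ q ∈ r.items,
            (q.2.isSome && !((pvAval (g0 :: rest)).contains q.1))
              = (q.2.isSome && !(decide (q.1 ∈ pvGroupFields (g0 :: rest)))) := by
          intro q _
          rw [PySem.Dict.contains_eq_decide_mem_keys, hkeys]
        rw [List.filter_congr hpred, List.map_map]
        have hpt : ∀ q ∈ r.items.filter
            (fun q => q.2.isSome && !(decide (q.1 ∈ pvGroupFields (g0 :: rest)))),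
            ((fun f => (f, pvFirstNonNone ((g0 :: rest) ++ [r]) f)) ∘ (·.1)) q = q := by
          intro q hq
          obtain ⟨hmem, hcond⟩ := List.mem_filter.mp hq
          obtain ⟨hs, hnm⟩ := Bool.and_eq_true_iff.mp hcond
          have hnm' : q.1 ∉ pvGroupFields (g0 :: rest) := by simpa using hnm
          have hfn0 : pvFirstNonNone (g0 :: rest) q.1 = none :=
            pvFirstNonNone_none_of_not_mem _ _ hnm'
          have hget : r.get? q.1 = some q.2 :=
            PySem.Dict.get?_of_mem_items r (by simpa using hmem) hr
          simp only [Function.comp_apply, pvFirstNonNone_append, hfn0, hget, Option.getD_some]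
        rw [List.map_congr_left hpt, List.map_id']

-- main loop invariant: A's merged dict is B's groups dict with every group reduced
theorem pvMain_fold (rows : List (List (String × Option String)))
    (m : PySem.Dict (Option String × Option String × Option String × Option String)
      (PySem.Dict String (Option String)))
    (g : PySem.Dict (Option String × Option String × Option String × Option String)
      (List (PySem.Dict String (Option String))))
    (hmg : m.items = g.items.map (fun p => (p.1, pvAval p.2)))
    (hgk : g.keys.Nodup)
    (hne : ∀ p ∈ g.items, p.2 ≠ [] ∧ ∀ r ∈ p.2, r.keys.Nodup) :
    (rows.foldl pvStepA m).items
        = (rows.foldl pvStepB g).items.map (fun p => (p.1, pvAval p.2))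
      ∧ (rows.foldl pvStepB g).keys.Nodup
      ∧ ∀ p ∈ (rows.foldl pvStepB g).items, p.2 ≠ [] ∧ ∀ r ∈ p.2, r.keys.Nodup := by
  induction rows generalizing m g with
  | nil => exact ⟨hmg, hgk, hne⟩
  | cons row rows ih =>
    have hrk : (PySem.Dict.ofList row).keys.Nodup := PySem.Dict.nodup_keys_ofList row
    have hkeys : m.keys = g.keys := by
      show m.items.map (·.1) = g.items.map (·.1)
      rw [hmg, List.map_map]
      exact List.map_congr_left fun p _ => rfl
    have hmk : m.keys.Nodup := hkeys ▸ hgk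
    simp only [List.foldl_cons]
    apply ih
    · -- the items correspondence survives one row
      simp only [pvStepA, pvStepB, PySem.Dict.modify]
      by_cases hc : g.contains (pvRowKey (PySem.Dict.ofList row)) = true
      · have hcm : m.contains (pvRowKey (PySem.Dict.ofList row)) = true := by
          rw [PySem.Dict.contains_eq_decide_mem_keys, hkeys,
            ← PySem.Dict.contains_eq_decide_mem_keys]
          exact hc
        have hsome : (g.get? (pvRowKey (PySem.Dict.ofList row))).isSome := by
          rw [← PySem.Dict.contains_eq_isSome_get?]
          exact hc
        obtain ⟨gl, hgl⟩ := Option.isSome_iff_exists.mp hsome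
        have hmem : (pvRowKey (PySem.Dict.ofList row), gl) ∈ g.items :=
          PySem.Dict.mem_items_of_get?_eq_some g hgl
        have hglne := hne _ hmem
        have hmget : m.get? (pvRowKey (PySem.Dict.ofList row)) = some (pvAval gl) := by
          apply PySem.Dict.get?_of_mem_items m _ hmk
          rw [hmg]
          exact List.mem_map_of_mem hmem
        rw [hmget, PySem.Dict.getD_eq_get?_getD, hgl]
        simp only [Option.getD_some]
        rw [← pvAval_append gl (PySem.Dict.ofList row) hglne.1,
          PySem.Dict.items_insert_of_contains m _ hcm,
          PySem.Dict.items_insert_of_contains g _ hc, hmg, List.map_map, List.map_map]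
        apply List.map_congr_left
        intro p hp
        by_cases he : p.1 = pvRowKey (PySem.Dict.ofList row)
        · have hp2 : p.2 = gl := by
            have h1 := PySem.Dict.get?_of_mem_items g (k := p.1) (v := p.2)
              (by simpa using hp) hgk
            rw [he, hgl] at h1
            exact (Option.some_inj.mp h1).symm
          have hpe : (p.1 == pvRowKey (PySem.Dict.ofList row)) = true := by simpa using he
          simp only [Function.comp_apply, hpe, if_true, hp2]
        · have hpe : (p.1 == pvRowKey (PySem.Dict.ofList row)) = false := by simpa using he
          simp only [Function.comp_apply, hpe, Bool.false_eq_true, if_false]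
      · have hcb : g.contains (pvRowKey (PySem.Dict.ofList row)) = false := by simpa using hc
        have hcmb : m.contains (pvRowKey (PySem.Dict.ofList row)) = false := by
          rw [PySem.Dict.contains_eq_decide_mem_keys, hkeys,
            ← PySem.Dict.contains_eq_decide_mem_keys]
          exact hcb
        have hmget : m.get? (pvRowKey (PySem.Dict.ofList row)) = none := by
          have h1 := PySem.Dict.contains_eq_isSome_get? m (pvRowKey (PySem.Dict.ofList row))
          rw [hcmb] at h1
          exact Option.not_isSome_iff_eq_none.mp (by rw [← h1]; simp)
        rw [hmget, PySem.Dict.getD_of_not_contains g [] hcb]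
        simp only [Option.getD_none, List.nil_append]
        rw [pvMergeRowA_self _ hrk, PySem.Dict.items_insert_of_not_contains m _ hcmb,
          PySem.Dict.items_insert_of_not_contains g _ hcb, hmg, List.map_append]
        rfl
    · -- keys stay unique
      simp only [pvStepB, PySem.Dict.modify]
      exact PySem.Dict.nodup_keys_insert g _ _ hgk
    · -- every stored group stays nonempty with unique per-row keys
      intro p hp
      simp only [pvStepB, PySem.Dict.modify] at hp
      rcases (PySem.Dict.mem_items_insert g _ _ p).mp hp with he | hold
      · subst he
        constructor
        · simp
        · intro x hx
          rcases List.mem_append.mp hx with hxl | hxr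
          · by_cases hc : g.contains (pvRowKey (PySem.Dict.ofList row)) = true
            · have hsome : (g.get? (pvRowKey (PySem.Dict.ofList row))).isSome := by
                rw [← PySem.Dict.contains_eq_isSome_get?]
                exact hc
              obtain ⟨gl, hgl⟩ := Option.isSome_iff_exists.mp hsome
              rw [PySem.Dict.getD_eq_get?_getD, hgl, Option.getD_some] at hxl
              exact (hne _ (PySem.Dict.mem_items_of_get?_eq_some g hgl)).2 x hxl
            · rw [PySem.Dict.getD_of_not_contains g [] (by simpa using hc)] at hxl
              cases hxl
          · rw [List.mem_singleton.mp hxr]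
            exact hrk
      · exact hne p hold.1

-- ===== VERDICT (by name: the statement is the Claim_ definition above) =====
theorem merge_statement_rows_py_spec : Claim_equal_merge_statement_rows_py := by
  intro rows _
  unfold Spec_merge_statement_rows_py merge_statement_rows_py merge_statement_rows_py_alt
  obtain ⟨hitems, _, hne⟩ := pvMain_fold rows PySem.Dict.empty PySem.Dict.empty rfl
    (PySem.Dict.nodup_keys_empty) (by intro p hp; cases hp)
  simp only [PySem.Dict.values]
  rw [hitems, List.map_map, List.map_map, List.map_map]
  apply List.map_congr_left
  intro p hp
  have h2 := hne p hp
  exact pvGroup_spec p.2 h2.1 h2.2
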